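-- pv_equiv track=rewrite | github.com/Reshala5739/KuznetsovPR33-203Dops | dop3.py | findBeautyDegree
-- ===== SOURCE A (Python) =====
-- from collections import Counter
--
-- def findBeautyDegree(n, sequence):
--     # Проверяем, содержатся ли все числа от 1 до max(sequence)
--     maxColor = max(sequence)
--     requiredColors = set(range(1, maxColor + 1))
--     if requiredColors - set(sequence):
--         return 0
--
--     # Подсчет частот чисел в последовательности
--     frequency = Counter(sequence).values()
--
--     # Упорядоченные частоты
--     sortedFrequencies = sorted(frequency, reverse=True)
--
--     # Инициализация степени красоты
--     beautyDegree = 0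
--
--     for freq in sortedFrequencies:
--         if freq > beautyDegree:
--             beautyDegree += 1
--         else:
--             break
--
--     return beautyDegree
-- ===== SOURCE B (Python) =====
-- from collections import Counter
--
-- def findBeautyDegree(n, sequence):
--     freq = Counter(sequence)
--     maxColor = max(sequence)
--     m = len(freq)
--     if maxColor > m:
--         return 0
--     for c in range(1, maxColor + 1):
--         if c not in freq:
--             return 0
--     bucket = [0] * (m + 1)
--     for f in freq.values():
--         j = f if f < m else m
--         bucket[j] = bucket[j] + 1
--     degree = 0
--     atLeast = 0
--     for k in range(m, 0, -1):
--         atLeast += bucket[k]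
--         if atLeast >= k:
--             degree += 1
--     return degree
-- ===== Notes on version B (the rewrite author's own statement) =====
-- stated objective: faster
-- what changed: B replaces A's materialised set(range(1, max+1)) difference and sort-then-greedy h-index scan by a dict-membership presence check (with a pigeonhole size guard) plus an O(n) bucket count of capped frequencies scanned once in descending order.
import Mathlib
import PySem

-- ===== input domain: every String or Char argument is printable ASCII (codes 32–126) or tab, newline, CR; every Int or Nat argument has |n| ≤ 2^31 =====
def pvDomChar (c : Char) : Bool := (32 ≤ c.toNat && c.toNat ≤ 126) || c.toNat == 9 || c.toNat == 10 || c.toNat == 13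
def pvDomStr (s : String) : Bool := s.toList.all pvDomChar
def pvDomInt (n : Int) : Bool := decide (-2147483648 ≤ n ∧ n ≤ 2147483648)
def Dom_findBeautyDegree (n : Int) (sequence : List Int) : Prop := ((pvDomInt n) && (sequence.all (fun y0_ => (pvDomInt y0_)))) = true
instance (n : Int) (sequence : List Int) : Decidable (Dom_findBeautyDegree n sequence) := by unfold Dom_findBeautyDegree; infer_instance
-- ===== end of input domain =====

-- B replaces A's sort-then-greedy h-index scan (and its materialised set(range(1, max+1)))
-- by an O(n) bucket count over capped frequencies with one descending suffix-sum pass.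

-- ===== PORT A =====
-- the 'for freq in sortedFrequencies: … else: break' loop of A
def goA : List Int → Int → Int
  | [], beautyDegree => beautyDegree
  | freq :: rest, beautyDegree =>
    if beautyDegree < freq then goA rest (beautyDegree + 1) else beautyDegree

def findBeautyDegree (n : Int) (sequence : List Int) : Int :=
  match PySem.List.max? sequence (fun x => x) with
  | none => 0  -- max([]) raises ValueError: excluded by Pre_
  | some maxColor =>
    -- set(range(1, maxColor+1)): the range has no duplicates, so set(...) is the range list
    -- itself (PySem.Set.ofList_eq_self_of_nodup with PySem.List.nodup_pyRange_one); written
    -- directly so the port evaluates in linear, not quadratic, time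
    let requiredColors : PySem.Set Int := PySem.List.pyRange 1 (maxColor + 1) 1
    if PySem.Set.diff requiredColors (PySem.Set.ofList sequence) ≠ [] then 0
    else
      let frequency := PySem.Dict.values (PySem.Dict.counter sequence)
      let sortedFrequencies := PySem.List.sorted frequency (fun x => x) true
      goA sortedFrequencies 0

-- ===== PORT B =====
-- 'bucket[j] = bucket[j] + 1' with j = (f if f < m else m), the body of B's bucket loop
def bucketUpd (m : Int) (b : List Int) (f : Int) : List Int :=
  let j := if f < m then f else m
  PySem.List.pySetD b j (PySem.List.pyGetD b j 0 + 1)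

-- body of B's 'for k in range(m, 0, -1)' loop; state = (degree, atLeast)
def scanStep (bucket : List Int) (st : Int × Int) (k : Int) : Int × Int :=
  let atLeast := st.2 + PySem.List.pyGetD bucket k 0
  (if k ≤ atLeast then st.1 + 1 else st.1, atLeast)

def findBeautyDegree_alt (n : Int) (sequence : List Int) : Int :=
  let freq := PySem.Dict.counter sequence
  match PySem.List.max? sequence (fun x => x) with
  | none => 0  -- max([]) raises ValueError: excluded by Pre_
  | some maxColor =>
    let m : Int := (PySem.Dict.size freq : Int)
    if m < maxColor then 0
    else if (PySem.List.pyRange 1 (maxColor + 1) 1).all (fun c => PySem.Dict.contains freq c) then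
      let bucket := (PySem.Dict.values freq).foldl (bucketUpd m) (List.replicate (m + 1).toNat 0)
      ((PySem.List.pyRange m 0 (-1)).foldl (scanStep bucket) (0, 0)).1
    else 0

-- ===== PRECONDITION & SPEC =====
-- Pre_ excludes only the empty sequence, on which A's max(sequence) raises ValueError.
def Pre_findBeautyDegree (n : Int) (sequence : List Int) : Prop := sequence ≠ []
instance (n : Int) (sequence : List Int) : Decidable (Pre_findBeautyDegree n sequence) := by unfold Pre_findBeautyDegree; infer_instance
def pvWitness_findBeautyDegree : Int × List Int := (4, [1, 2, 2, 1])

def Spec_findBeautyDegree (n : Int) (sequence : List Int) (out : Int) : Prop := out = findBeautyDegree_alt n sequence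
instance (n : Int) (sequence : List Int) (out : Int) : Decidable (Spec_findBeautyDegree n sequence out) := by unfold Spec_findBeautyDegree; infer_instance

-- ===== CLAIM (what is proved, stated in full; the proofs are below) =====
def Claim_equal_findBeautyDegree : Prop := ∀ (n : Int) (sequence : List Int), Dom_findBeautyDegree n sequence → Pre_findBeautyDegree n sequence → Spec_findBeautyDegree n sequence (findBeautyDegree n sequence)

-- ===== LEMMAS AND PROOFS =====

-- number of elements of fs that are ≥ k
def cLeast (fs : List Int) (k : Int) : Int := (fs.countP (fun f => decide (k ≤ f)) : Int)

-- Σ_{i<j} [ i+1 ≤ cLeast fs (i+1) ] — the common value of both programs' main loops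
def sumB (fs : List Int) (j : Nat) : Int :=
  ((List.range j).map (fun (i : Nat) => if ((i : Int) + 1) ≤ cLeast fs ((i : Int) + 1) then (1 : Int) else 0)).sum

-- Σ_{i<|s|} [ d + i < s[i] ], in the shifted-accumulator shape of A's loop
def cntIdx : List Int → Int → Int
  | [], _ => 0
  | f :: rest, d => (if d < f then 1 else 0) + cntIdx rest (d + 1)

lemma sum_drop_set (b : List Int) : ∀ (i : Nat) (a : Int) (k : Nat) (h : i < b.length),
    ((b.set i a).drop k).sum = (b.drop k).sum + (if k ≤ i then a - b[i] else 0) := by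
  induction b with
  | nil => intro i a k h; simp at h
  | cons x xs ih =>
    intro i a k h
    cases i with
    | zero =>
      cases k with
      | zero => simp [List.set_cons_zero]; ring
      | succ k' => simp [List.set_cons_zero]
    | succ i' =>
      have h' : i' < xs.length := by simpa using h
      cases k with
      | zero =>
        have hthis := ih i' a 0 h'
        simp only [List.drop_zero, Nat.zero_le, if_pos] at hthis
        simp only [List.set_cons_succ, List.drop_zero, List.sum_cons, hthis,
          List.getElem_cons_succ, Nat.zero_le, if_pos]
        ring
      | succ k' =>
        have hthis := ih i' a k' h'
        simp only [List.set_cons_succ, List.drop_succ_cons, hthis, List.getElem_cons_succ,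
          Nat.add_le_add_iff_right]

-- the bucket fold adds, for each f, one to every suffix-sum with cutoff k ≤ (f if f<m else m)
lemma bucket_fold_sum (M : Nat) : ∀ (fs b : List Int), (∀ f ∈ fs, 1 ≤ f) → b.length = M + 1 →
    ∀ k : Nat,
    ((fs.foldl (bucketUpd (M : Int)) b).drop k).sum
      = (b.drop k).sum + ((fs.countP (fun f => decide ((k : Int) ≤ if f < (M : Int) then f else (M : Int)))) : Int) := by
  intro fs
  induction fs with
  | nil => intro b _ _ k; simp
  | cons f fs ih =>
    intro b hpos hb k
    have hf1 : 1 ≤ f := hpos f List.mem_cons_self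
    have hpos' : ∀ g ∈ fs, 1 ≤ g := fun g hg => hpos g (List.mem_cons_of_mem f hg)
    set j : Int := if f < (M : Int) then f else (M : Int) with hj
    have hj0 : 0 ≤ j := by rw [hj]; split_ifs <;> omega
    have hjlt : j.toNat < b.length := by rw [hb, hj]; split_ifs <;> omega
    have hstep : bucketUpd (M : Int) b f = b.set j.toNat (b[j.toNat] + 1) := by
      simp only [bucketUpd, ← hj]
      rw [PySem.List.pySetD_of_nonneg _ _ hj0,
        PySem.List.pyGetD_eq_getElem _ _ hj0 (by omega : j < ((b.length : Nat) : Int))]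
    simp only [List.foldl_cons, hstep]
    rw [ih _ hpos' (by simp [hb]) k, sum_drop_set _ _ _ _ hjlt, List.countP_cons]
    have hkj : ((k : Int) ≤ j) ↔ (k ≤ j.toNat) := by omega
    push_cast
    by_cases hkle : (k : Int) ≤ j
    · rw [if_pos (hkj.mp hkle), if_pos (by simpa using hkle)]
      ring
    · rw [if_neg (fun hh => hkle (hkj.mpr hh)), if_neg (by simpa using hkle)]
      ring

lemma bucket_length (M : Nat) (fs b : List Int) (hb : b.length = M + 1) :
    (fs.foldl (bucketUpd (M : Int)) b).length = M + 1 := by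
  induction fs generalizing b with
  | nil => simpa using hb
  | cons f fs ih =>
    simp only [List.foldl_cons]
    exact ih _ (by simp [bucketUpd, PySem.List.length_pySetD, hb])

lemma bucket_sum_eq_cLeast (M : Nat) (fs : List Int) (hpos : ∀ f ∈ fs, 1 ≤ f)
    (k : Nat) (hkM : k ≤ M) :
    (((fs.foldl (bucketUpd (M : Int)) (List.replicate (M + 1) 0)).drop k).sum) = cLeast fs k := by
  rw [bucket_fold_sum M fs (List.replicate (M + 1) 0) hpos (by simp) k]
  rw [List.drop_replicate]
  simp only [List.sum_replicate, smul_zero, zero_add]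
  unfold cLeast
  have hcc : fs.countP (fun f => decide ((k : Int) ≤ if f < (M : Int) then f else (M : Int)))
      = fs.countP (fun f => decide ((k : Int) ≤ f)) := by
    apply List.countP_congr
    intro f hf
    have hf1 : 1 ≤ f := hpos f hf
    simp only [decide_eq_true_eq]
    split_ifs with hlt
    · exact Iff.rfl
    · constructor <;> intro <;> omega
  rw [hcc]

-- B's descending scan accumulates sumB
lemma scan_fold (M : Nat) (fs bucket : List Int) (hb : bucket.length = M + 1)
    (hc : ∀ k : Nat, 1 ≤ k → k ≤ M → ((bucket.drop k).sum) = cLeast fs k) :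
    ∀ j : Nat, j ≤ M → ∀ D : Int,
    (PySem.List.pyRange (j : Int) 0 (-1)).foldl (scanStep bucket) (D, (bucket.drop (j + 1)).sum)
      = (D + sumB fs j, (bucket.drop 1).sum) := by
  intro j
  induction j with
  | zero =>
    intro _ D
    rw [Nat.cast_zero, PySem.List.pyRange_neg_one_eq_nil le_rfl]
    simp [sumB]
  | succ j ih =>
    intro hj D
    have hjM : j ≤ M := Nat.le_of_succ_le hj
    rw [PySem.List.pyRange_neg_one_cons (by exact_mod_cast Nat.succ_pos j)]
    have hcast : ((j + 1 : Nat) : Int) - 1 = (j : Int) := by push_cast; ring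
    rw [hcast]
    simp only [List.foldl_cons]
    have hlt : j + 1 < bucket.length := by omega
    have hget : PySem.List.pyGetD bucket ((j + 1 : Nat) : Int) 0 = bucket[j + 1] := by
      rw [PySem.List.pyGetD_natCast, List.getD_eq_getElem _ _ hlt]
    have hdrop : (bucket.drop (j + 1)).sum = bucket[j + 1] + (bucket.drop (j + 1 + 1)).sum := by
      rw [List.drop_eq_getElem_cons hlt, List.sum_cons]
    have hstate : scanStep bucket (D, (bucket.drop (j + 1 + 1)).sum) ((j + 1 : Nat) : Int)
        = (if ((j : Int) + 1) ≤ cLeast fs (j + 1) then D + 1 else D, (bucket.drop (j + 1)).sum) := by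
      simp only [scanStep, hget]
      have hal : (bucket.drop (j + 1 + 1)).sum + bucket[j + 1] = cLeast fs (↑j + 1) := by
        have := hc (j + 1) (Nat.succ_le_succ (Nat.zero_le j)) hj
        push_cast at this
        omega
      rw [hal]
      have hcst : ((j + 1 : Nat) : Int) = (j : Int) + 1 := by push_cast; ring
      rw [hcst]
      have halt : (bucket.drop (j + 1)).sum = cLeast fs (↑j + 1) := by
        have := hc (j + 1) (Nat.succ_le_succ (Nat.zero_le j)) hj
        push_cast at this
        exact this
      rw [halt]
    rw [hstate, ih hjM _]
    have halt2 : (bucket.drop (j + 1)).sum = cLeast fs ((j : Int) + 1) := by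
      have := hc (j + 1) (Nat.succ_le_succ (Nat.zero_le j)) hj
      push_cast at this
      exact this
    have hsum : sumB fs (j + 1) = sumB fs j + (if ((j : Int) + 1) ≤ cLeast fs ((j : Int) + 1) then (1 : Int) else 0) := by
      unfold sumB
      rw [List.range_succ, List.map_append, List.sum_append]
      simp
    rw [hsum]
    split_ifs <;> simp only [Prod.mk.injEq] <;> exact ⟨by ring, trivial⟩


lemma cntIdx_zero (s : List Int) : ∀ d : Int, (∀ f ∈ s, f ≤ d) → cntIdx s d = 0 := by
  induction s with
  | nil => intro d _; rfl
  | cons f r ih =>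
    intro d h
    have hf : f ≤ d := h f List.mem_cons_self
    simp only [cntIdx, if_neg (by omega : ¬ d < f), zero_add]
    exact ih (d + 1) (fun g hg => le_trans (h g (List.mem_cons_of_mem f hg)) (by omega))

lemma goA_eq_cntIdx : ∀ (s : List Int), s.Pairwise (fun a b => b ≤ a) →
    ∀ d : Int, goA s d = d + cntIdx s d := by
  intro s
  induction s with
  | nil => intro _ d; simp [goA, cntIdx]
  | cons f r ih =>
    intro hs d
    rcases List.pairwise_cons.mp hs with ⟨hhead, htail⟩
    by_cases hd : d < f
    · simp only [goA, cntIdx, if_pos hd]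
      rw [ih htail (d + 1)]
      ring
    · simp only [goA, cntIdx, if_neg hd]
      rw [cntIdx_zero r (d + 1) (fun g hg => le_trans (hhead g hg) (by omega))]
      ring

lemma cntIdx_eq_sum (s : List Int) : ∀ d : Int,
    cntIdx s d = ((List.range s.length).map (fun (i : Nat) => if d + (i : Int) < s.getD i 0 then (1 : Int) else 0)).sum := by
  induction s with
  | nil => intro d; simp [cntIdx]
  | cons f r ih =>
    intro d
    simp only [cntIdx, List.length_cons, List.range_succ_eq_map, List.map_cons, List.sum_cons,
      List.map_map]
    rw [ih (d + 1)]
    congr 1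
    · simp
    · apply congrArg List.sum
      apply List.map_congr_left
      intro i _
      simp only [Function.comp_apply, Nat.succ_eq_add_one, List.getD_cons_succ]
      congr 1
      apply propext
      push_cast
      constructor <;> intro <;> omega

-- on a descending list, "the (i+1)-st largest is > i" ↔ "at least i+1 elements are ≥ i+1"
lemma pointwise (s : List Int) (hs : s.Pairwise (fun a b => b ≤ a)) (i : Nat) (hi : i < s.length) :
    ((i : Int) < s[i]) ↔ ((i : Int) + 1 ≤ (s.countP (fun f => decide ((i : Int) + 1 ≤ f)) : Int)) := by
  have hpw := List.pairwise_iff_getElem.mp hs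
  have hsplit1 : s.countP (fun f => decide ((i : Int) + 1 ≤ f))
      = (s.take (i + 1)).countP (fun f => decide ((i : Int) + 1 ≤ f))
        + (s.drop (i + 1)).countP (fun f => decide ((i : Int) + 1 ≤ f)) := by
    conv_lhs => rw [← List.take_append_drop (i + 1) s]
    rw [List.countP_append]
  have hsplit2 : s.countP (fun f => decide ((i : Int) + 1 ≤ f))
      = (s.take i).countP (fun f => decide ((i : Int) + 1 ≤ f))
        + (s.drop i).countP (fun f => decide ((i : Int) + 1 ≤ f)) := by
    conv_lhs => rw [← List.take_append_drop i s]
    rw [List.countP_append]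
  constructor
  · intro hgt
    have htake : (s.take (i + 1)).countP (fun f => decide ((i : Int) + 1 ≤ f))
        = (s.take (i + 1)).length := by
      rw [List.countP_eq_length]
      intro a ha
      rcases List.mem_take_iff_getElem.mp ha with ⟨j, hj, rfl⟩
      have hji : j ≤ i := by omega
      have hs_le : s[i] ≤ s[j] := by
        rcases Nat.lt_or_ge j i with h | h
        · exact hpw j i (by omega) hi h
        · have hji' : j = i := by omega
          subst hji'
          exact le_refl _
      simp only [decide_eq_true_eq]
      omega
    have hlen : (s.take (i + 1)).length = i + 1 := by
      rw [List.length_take]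
      omega
    omega
  · intro hcnt
    by_contra hle
    rw [not_lt] at hle
    have hdrop : (s.drop i).countP (fun f => decide ((i : Int) + 1 ≤ f)) = 0 := by
      rw [List.countP_eq_zero]
      intro a ha
      rcases List.mem_drop_iff_getElem.mp ha with ⟨j, hj, rfl⟩
      have hs_le : s[i + j] ≤ s[i] := by
        rcases Nat.eq_zero_or_pos j with h | h
        · subst h
          simp
        · exact hpw i (i + j) hi (by omega) (by omega)
      simp only [decide_eq_true_eq]
      omega
    have htk : (s.take i).countP (fun f => decide ((i : Int) + 1 ≤ f)) ≤ i :=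
      le_trans List.countP_le_length (by rw [List.length_take]; omega)
    omega

-- A's whole main phase equals sumB of the frequency list
lemma goA_sorted_eq_sumB (fs : List Int) :
    goA (PySem.List.sorted fs (fun x => x) true) 0 = sumB fs fs.length := by
  set s := PySem.List.sorted fs (fun x => x) true with hsdef
  have hs : s.Pairwise (fun a b => b ≤ a) := PySem.List.sorted_pairwise_rev fs (fun x => x)
  have hlen : s.length = fs.length := PySem.List.length_sorted fs (fun x => x) true
  rw [goA_eq_cntIdx s hs 0, cntIdx_eq_sum s 0, zero_add]
  unfold sumB
  rw [← hlen]
  apply congrArg List.sum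
  apply List.map_congr_left
  intro i hi
  have hi' : i < s.length := List.mem_range.mp hi
  rw [List.getD_eq_getElem s 0 hi', zero_add]
  have hperm : s.countP (fun f => decide ((i : Int) + 1 ≤ f))
      = fs.countP (fun f => decide ((i : Int) + 1 ≤ f)) :=
    (PySem.List.sorted_perm fs (fun x => x) true).countP_eq _
  have hpt := pointwise s hs i hi'
  unfold cLeast
  rw [← hperm]
  by_cases hcond : (i : Int) < s[i]
  · rw [if_pos hcond, if_pos (hpt.mp hcond)]
  · rw [if_neg hcond, if_neg (fun hh => hcond (hpt.mpr hh))]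

-- the values of Counter(sequence)
lemma values_counter_facts (sequence : List Int) :
    (PySem.Dict.values (PySem.Dict.counter sequence)).length = (PySem.Dict.size (PySem.Dict.counter sequence)) ∧
    (∀ f ∈ PySem.Dict.values (PySem.Dict.counter sequence), 1 ≤ f) := by
  constructor
  · simp [PySem.Dict.values, PySem.Dict.size, PySem.Dict.items_counter]
  · intro f hf
    simp only [PySem.Dict.values, PySem.Dict.items_counter, List.map_map, List.mem_map] at hf
    rcases hf with ⟨k, hk, hfk⟩
    have hkseq : k ∈ sequence := (PySem.Set.mem_ofList sequence k).mp hk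
    have hcnt : 0 < sequence.count k := List.count_pos_iff.mpr hkseq
    simp only [Function.comp_apply] at hfk
    omega

-- A's emptiness test of set(range(1,max+1)) - set(sequence), as a plain statement
lemma diff_eq_nil_iff (maxColor : Int) (sequence : List Int) :
    (PySem.Set.diff (PySem.List.pyRange 1 (maxColor + 1) 1) (PySem.Set.ofList sequence) = [])
      ↔ (∀ c : Int, 1 ≤ c → c ≤ maxColor → c ∈ sequence) := by
  rw [List.eq_nil_iff_forall_not_mem]
  constructor
  · intro h c h1 hc
    by_contra hnot
    exact h c ((PySem.Set.mem_diff _ _ c).mpr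
      ⟨PySem.List.mem_pyRange_one.mpr ⟨h1, by omega⟩,
       fun hmem => hnot ((PySem.Set.mem_ofList sequence c).mp hmem)⟩)
  · intro h x hx
    rcases (PySem.Set.mem_diff _ _ x).mp hx with ⟨hxr, hxs⟩
    have hxm := PySem.List.mem_pyRange_one.mp hxr
    exact hxs ((PySem.Set.mem_ofList sequence x).mpr (h x hxm.1 (by omega)))

lemma all_contains_iff (maxColor : Int) (sequence : List Int) :
    ((PySem.List.pyRange 1 (maxColor + 1) 1).all (fun c => PySem.Dict.contains (PySem.Dict.counter sequence) c) = true)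
      ↔ (∀ c : Int, 1 ≤ c → c ≤ maxColor → c ∈ sequence) := by
  rw [List.all_eq_true]
  constructor
  · intro h c h1 h2
    have hmem := h c (PySem.List.mem_pyRange_one.mpr ⟨h1, by omega⟩)
    rw [PySem.Dict.contains_counter] at hmem
    simpa using hmem
  · intro h c hc
    obtain ⟨h1, h2⟩ := PySem.List.mem_pyRange_one.mp hc
    rw [PySem.Dict.contains_counter]
    simpa using h c h1 (by omega)

-- pigeonhole: if all of 1..maxColor occur in sequence, maxColor ≤ number of distinct elements
lemma pigeonhole (maxColor : Int) (sequence : List Int)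
    (hP : ∀ c : Int, 1 ≤ c → c ≤ maxColor → c ∈ sequence) :
    maxColor ≤ (PySem.Dict.size (PySem.Dict.counter sequence) : Int) := by
  have hsz : (PySem.Dict.size (PySem.Dict.counter sequence)) = (PySem.Set.ofList sequence).length := by
    simp [PySem.Dict.size, PySem.Dict.items_counter]
  by_cases hmc : maxColor ≤ 0
  · omega
  · rw [not_le] at hmc
    have hsub : (PySem.List.pyRange 1 (maxColor + 1) 1) ⊆ PySem.Set.ofList sequence := by
      intro x hx
      obtain ⟨h1, h2⟩ := PySem.List.mem_pyRange_one.mp hx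
      exact (PySem.Set.mem_ofList sequence x).mpr (hP x h1 (by omega))
    have hle := ((PySem.List.nodup_pyRange_one 1 (maxColor + 1)).subperm hsub).length_le
    rw [PySem.List.length_pyRange_one] at hle
    omega

-- ===== VERDICT (by name: the statement is the Claim_ definition above) =====
theorem findBeautyDegree_spec : Claim_equal_findBeautyDegree := by
  unfold Claim_equal_findBeautyDegree
  intro n sequence _ hpre
  cases hmax : PySem.List.max? sequence (fun x => x) with
  | none =>
    exact absurd ((PySem.List.max?_eq_none_iff sequence (fun x => x)).mp hmax) hpre
  | some maxColor =>
    simp only [Spec_findBeautyDegree, findBeautyDegree, findBeautyDegree_alt, hmax]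
    by_cases hP : ∀ c : Int, 1 ≤ c → c ≤ maxColor → c ∈ sequence
    · have hdiff := (diff_eq_nil_iff maxColor sequence).mpr hP
      rw [if_neg (by simp [hdiff])]
      have hple := pigeonhole maxColor sequence hP
      rw [if_neg (by omega :
            ¬ ((PySem.Dict.size (PySem.Dict.counter sequence) : Int) < maxColor)),
          if_pos ((all_contains_iff maxColor sequence).mpr hP)]
      obtain ⟨hlenv, hposv⟩ := values_counter_facts sequence
      set fs := PySem.Dict.values (PySem.Dict.counter sequence) with hfs
      set M := fs.length with hM
      have hsz : ((PySem.Dict.size (PySem.Dict.counter sequence) : Nat) : Int) = (M : Int) := by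
        exact congrArg Nat.cast hlenv.symm
      rw [hsz]
      have hrep : ((M : Int) + 1).toNat = M + 1 := by omega
      rw [hrep]
      have hbl := bucket_length M fs (List.replicate (M + 1) 0) (by simp)
      have hscan := scan_fold M fs (fs.foldl (bucketUpd (M : Int)) (List.replicate (M + 1) 0)) hbl
        (fun k _ hkM => bucket_sum_eq_cLeast M fs hposv k hkM) M le_rfl 0
      have h0 : ((fs.foldl (bucketUpd (M : Int)) (List.replicate (M + 1) 0)).drop (M + 1)).sum
          = 0 := by
        rw [List.drop_of_length_le (le_of_eq hbl)]
        rfl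
      rw [h0] at hscan
      rw [hscan, goA_sorted_eq_sumB fs, ← hM]
      simp
    · rw [if_pos (fun h => hP ((diff_eq_nil_iff maxColor sequence).mp h))]
      by_cases hm : ((PySem.Dict.size (PySem.Dict.counter sequence) : Nat) : Int) < maxColor
      · rw [if_pos hm]
      · rw [if_neg hm, if_neg (fun h => hP ((all_contains_iff maxColor sequence).mp h))]
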